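-- pv_equiv track=rewrite | github.com/aretrosen/mmWave-Parser | readData_AWR1642.py | meshgrid
-- ===== SOURCE A (Python) =====
-- def meshgrid(xvec, yvec):
--     x = []
--     y = []
--     for r in range(0, len(yvec)):
--         for c in range(0, len(xvec)):
--             x.append(xvec[c])
--             y.append(yvec[r])
--     return [x, y]
-- ===== SOURCE B (Python) =====
-- def meshgrid(xvec, yvec):
--     nx = len(xvec)
--     n = nx * len(yvec)
--     x = [xvec[k % nx] for k in range(n)]
--     y = [yvec[k // nx] for k in range(n)]
--     return [x, y]
-- ===== Notes on version B (the rewrite author's own statement) =====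
-- stated objective: alternative
-- what changed: Replaces A's interleaved nested row/column loops by a single pass over the flat index range(len(xvec)*len(yvec)), recovering each coordinate by divmod arithmetic (k % nx for x, k // nx for y).
import Mathlib
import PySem

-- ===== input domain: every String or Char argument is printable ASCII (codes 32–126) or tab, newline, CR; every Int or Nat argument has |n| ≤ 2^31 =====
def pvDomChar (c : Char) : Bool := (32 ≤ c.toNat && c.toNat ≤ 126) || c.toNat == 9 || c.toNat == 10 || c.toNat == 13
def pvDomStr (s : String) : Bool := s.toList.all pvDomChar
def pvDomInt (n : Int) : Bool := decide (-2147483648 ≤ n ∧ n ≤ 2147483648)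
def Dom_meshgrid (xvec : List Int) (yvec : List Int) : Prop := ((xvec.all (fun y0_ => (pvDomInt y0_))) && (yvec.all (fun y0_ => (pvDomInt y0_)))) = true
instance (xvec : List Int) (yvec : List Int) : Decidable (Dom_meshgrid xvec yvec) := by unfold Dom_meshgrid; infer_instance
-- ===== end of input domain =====

-- B decodes a single flat index range by divmod arithmetic instead of A's interleaved nested loops; objective: alternative.

-- ===== PORT A =====
-- nested index loops appending xvec[c] to x and yvec[r] to y (indices always in range, so pyGetD is exact)
def meshgrid (xvec : List Int) (yvec : List Int) : List (List Int) :=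
  let p := (PySem.List.pyRange 0 (PySem.List.len yvec) 1).foldl
    (fun (st : List Int × List Int) r =>
      (PySem.List.pyRange 0 (PySem.List.len xvec) 1).foldl
        (fun st c => (st.1 ++ [PySem.List.pyGetD xvec c 0], st.2 ++ [PySem.List.pyGetD yvec r 0])) st)
    ([], [])
  [p.1, p.2]

-- ===== PORT B =====
-- x = [xvec[k % nx] for k in range(n)], y = [yvec[k // nx] for k in range(n)] with n = nx*len(yvec).
-- k ranges over nonnegative values and k % nx, k // nx are only evaluated with nx > 0 (n = 0 otherwise),
-- so Nat % and / are exact for Python's % and // here.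
def meshgrid_alt (xvec : List Int) (yvec : List Int) : List (List Int) :=
  let nx := xvec.length
  let n := nx * yvec.length
  [(List.range n).map (fun k => xvec.getD (k % nx) 0),
   (List.range n).map (fun k => yvec.getD (k / nx) 0)]

-- ===== PRECONDITION & SPEC =====
def Spec_meshgrid (xvec : List Int) (yvec : List Int) (out : List (List Int)) : Prop := out = meshgrid_alt xvec yvec
instance (xvec : List Int) (yvec : List Int) (out : List (List Int)) : Decidable (Spec_meshgrid xvec yvec out) := by unfold Spec_meshgrid; infer_instance

-- ===== CLAIM (what is proved, stated in full; the proofs are below) =====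
def Claim_equal_meshgrid : Prop := ∀ (xvec : List Int) (yvec : List Int), Dom_meshgrid xvec yvec → Spec_meshgrid xvec yvec (meshgrid xvec yvec)

-- ===== LEMMAS AND PROOFS =====

-- A's inner loop appends the elements of xvec to x and repeats v on y.
lemma inner_fold (xvec : List Int) (v : Int) (st : List Int × List Int) :
    xvec.foldl (fun (st : List Int × List Int) u => (st.1 ++ [u], st.2 ++ [v])) st
      = (st.1 ++ xvec, st.2 ++ List.replicate xvec.length v) := by
  induction xvec generalizing st with
  | nil => simp
  | cons a l ih => simp [ih, List.replicate_succ]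

-- A's inner loop in its pyRange-indexed form.
lemma inner_range (xvec : List Int) (v : Int) (st : List Int × List Int) :
    (PySem.List.pyRange 0 (PySem.List.len xvec) 1).foldl
      (fun (st : List Int × List Int) c => (st.1 ++ [PySem.List.pyGetD xvec c 0], st.2 ++ [v])) st
      = (st.1 ++ xvec, st.2 ++ List.replicate xvec.length v) := by
  rw [PySem.List.foldl_pyRange_zero_pyGetD xvec 0
      (fun (st : List Int × List Int) u => (st.1 ++ [u], st.2 ++ [v])) st]
  exact inner_fold xvec v st

-- A's outer loop accumulates the tiled x and block-repeated y.
lemma outer_fold (xvec yvec : List Int) (st : List Int × List Int) :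
    yvec.foldl (fun (st : List Int × List Int) v =>
        (st.1 ++ xvec, st.2 ++ List.replicate xvec.length v)) st
      = (st.1 ++ (List.replicate yvec.length xvec).flatten,
         st.2 ++ yvec.flatMap (fun v => List.replicate xvec.length v)) := by
  induction yvec generalizing st with
  | nil => simp
  | cons a l ih => simp [ih, List.replicate_succ]

-- Reading off a list by its own indices reproduces it.
lemma map_getD_range (xs : List Int) :
    (List.range xs.length).map (fun j => xs.getD j 0) = xs := by
  apply List.ext_getElem
  · simp
  · intro i h1 h2
    simp [List.getD_eq_getElem?_getD, List.getElem?_eq_getElem h2]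

-- B's x-row (flat-index mod decode) equals the tiled xvec.
lemma xrow (xvec : List Int) (m : ℕ) :
    (List.range (xvec.length * m)).map (fun k => xvec.getD (k % xvec.length) 0)
      = (List.replicate m xvec).flatten := by
  induction m with
  | zero => simp
  | succ m ih =>
    rw [Nat.mul_succ, List.range_add, List.map_append, ih, List.replicate_succ',
        List.flatten_append, List.map_map]
    congr 1
    simp only [List.flatten_cons, List.flatten_nil, List.append_nil]
    rw [show ((fun k => xvec.getD (k % xvec.length) 0) ∘ (xvec.length * m + ·))
          = fun j => xvec.getD ((xvec.length * m + j) % xvec.length) 0 from rfl]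
    calc (List.range xvec.length).map (fun j => xvec.getD ((xvec.length * m + j) % xvec.length) 0)
        = (List.range xvec.length).map (fun j => xvec.getD j 0) := by
          apply List.map_congr_left
          intro j hj
          simp only [List.mem_range] at hj
          rw [Nat.mul_add_mod, Nat.mod_eq_of_lt hj]
      _ = xvec := map_getD_range xvec

-- B's y-row (flat-index div decode) equals the block-repeat of yvec.
lemma yrow (nx : ℕ) (yvec : List Int) :
    (List.range (nx * yvec.length)).map (fun k => yvec.getD (k / nx) 0)
      = yvec.flatMap (fun v => List.replicate nx v) := by
  rcases Nat.eq_zero_or_pos nx with h | h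
  · simp [h]
  induction yvec with
  | nil => simp
  | cons v ys ih =>
    rw [List.length_cons, Nat.mul_succ, Nat.add_comm, List.range_add, List.map_append,
        List.flatMap_cons]
    congr 1
    · calc (List.range nx).map (fun k => (v :: ys).getD (k / nx) 0)
          = (List.range nx).map (fun _ => v) := by
            apply List.map_congr_left
            intro k hk
            simp only [List.mem_range] at hk
            rw [Nat.div_eq_of_lt hk]; rfl
        _ = List.replicate nx v := by simp [List.map_const']
    · rw [List.map_map, ← ih]
      apply List.map_congr_left
      intro j _
      show (v :: ys).getD ((nx + j) / nx) 0 = ys.getD (j / nx) 0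
      rw [Nat.add_comm, Nat.add_div_right _ h]
      rfl

-- ===== VERDICT (by name: the statement is the Claim_ definition above) =====
theorem meshgrid_spec : Claim_equal_meshgrid := by
  intro xvec yvec _
  show meshgrid xvec yvec = meshgrid_alt xvec yvec
  unfold meshgrid meshgrid_alt
  rw [PySem.List.foldl_pyRange_zero_pyGetD yvec 0
      (fun (st : List Int × List Int) v =>
        (PySem.List.pyRange 0 (PySem.List.len xvec) 1).foldl
          (fun st c => (st.1 ++ [PySem.List.pyGetD xvec c 0], st.2 ++ [v])) st)
      ([], [])]
  have hfun : (fun (st : List Int × List Int) v =>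
        (PySem.List.pyRange 0 (PySem.List.len xvec) 1).foldl
          (fun st c => (st.1 ++ [PySem.List.pyGetD xvec c 0], st.2 ++ [v])) st)
      = (fun (st : List Int × List Int) v =>
          (st.1 ++ xvec, st.2 ++ List.replicate xvec.length v)) := by
    funext st v
    exact inner_range xvec v st
  rw [hfun, outer_fold]
  simp only [List.nil_append]
  rw [xrow xvec yvec.length, yrow xvec.length yvec]
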